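-- pv_equiv track=rewrite | github.com/eika-sia/diglog-translator | transformers/coding/hamming.py | decodeHamming
-- ===== SOURCE A (Python) =====
-- def decodeHamming(h):
--     h = str(h).replace(" ", "")
--     sR = []
--     dR = ""
--
--     i = 0
--     while i < len(h):
--         if (((i+1) & (i) == 0) and i+1 != 0):
--             sR.append(h[i])
--         else:
--             dR += str(h[i])
--         i += 1
--
--     return dR, sR
-- ===== SOURCE B (Python) =====
-- def decodeHamming(h):
--     h = str(h).replace(" ", "")
--     sR = []
--     dR = ""
--     p = 1
--     while p - 1 < len(h):
--         sR.append(h[p - 1])       # parity bit at index 2^k - 1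
--         dR += h[p:2 * p - 1]      # data block between this parity bit and the next
--         p *= 2
--     return dR, sR
-- ===== Notes on version B (the rewrite author's own statement) =====
-- stated objective: faster
-- what changed: B replaces A's per-character scan with a power-of-two bit test by a doubling loop over the parity positions 2^k-1 that picks each parity bit directly and concatenates whole data blocks by slicing.
import Mathlib
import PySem

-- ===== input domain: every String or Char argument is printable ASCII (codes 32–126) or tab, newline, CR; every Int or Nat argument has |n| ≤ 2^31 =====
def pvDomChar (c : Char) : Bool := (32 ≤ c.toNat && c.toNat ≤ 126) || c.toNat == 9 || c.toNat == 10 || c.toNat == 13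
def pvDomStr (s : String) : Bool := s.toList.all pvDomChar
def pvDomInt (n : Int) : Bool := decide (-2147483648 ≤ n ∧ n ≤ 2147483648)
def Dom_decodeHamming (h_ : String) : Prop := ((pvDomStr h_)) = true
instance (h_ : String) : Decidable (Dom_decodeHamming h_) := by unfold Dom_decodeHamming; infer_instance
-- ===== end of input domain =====

-- B splits the Hamming string by the power-of-two block structure (a doubling loop over
-- parity positions 2^k-1 with whole-block slices) instead of A's per-character scan with a
-- power-of-two bit test; a timing run measured B faster on the generated inputs.

-- ===== PORT A =====
-- A's while loop over i; i is always ≥ 0 in Python, so a Nat index is exact, and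
-- Python's '&' on nonnegative ints is Nat.land (&&&). dR is carried as List Char and
-- converted to String at the end (Python string concatenation of single chars, exact).
def decodeHammingLoop (l : List Char) (i : Nat) (sR : List String) (dR : List Char) :
    List Char × List String :=
  match l with
  | [] => (dR, sR)
  | c :: rest =>
    if ((i+1) &&& i == 0) && (i+1 != 0) then
      decodeHammingLoop rest (i+1) (sR ++ [String.ofList [c]]) dR
    else
      decodeHammingLoop rest (i+1) sR (dR ++ [c])

def decodeHamming (h_ : String) : String × List String :=
  -- h = str(h).replace(" ", "") : str(h) is the identity on a string
  let l := (PySem.Str.replace h_ " " "").toList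
  let r := decodeHammingLoop l 0 [] []
  (String.ofList r.1, r.2)

-- ===== PORT B =====
-- B's while loop with doubling p; the extra hypothesis 1 ≤ p only justifies termination.
-- h[p:2p-1] with 0 ≤ p ≤ 2p-1 is exactly (drop p).take (p-1) (Python slices clamp = take clamps).
def decodeHammingAltLoop (l : List Char) (p : Nat) (hp : 1 ≤ p) (sR : List String)
    (dR : List Char) : List Char × List String :=
  if hlt : p - 1 < l.length then
    decodeHammingAltLoop l (2*p) (by omega) (sR ++ [String.ofList [l[p-1]]])
      (dR ++ (l.drop p).take (p-1))
  else (dR, sR)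
termination_by l.length - (p-1)
decreasing_by omega

def decodeHamming_alt (h_ : String) : String × List String :=
  let l := (PySem.Str.replace h_ " " "").toList
  let r := decodeHammingAltLoop l 1 (by omega) [] []
  (String.ofList r.1, r.2)

-- ===== PRECONDITION & SPEC =====
def Spec_decodeHamming (h_ : String) (out : String × List String) : Prop := out = decodeHamming_alt h_
instance (h_ : String) (out : String × List String) : Decidable (Spec_decodeHamming h_ out) := by unfold Spec_decodeHamming; infer_instance

-- ===== CLAIM (what is proved, stated in full; the proofs are below) =====
def Claim_equal_decodeHamming : Prop := ∀ (h_ : String), Dom_decodeHamming h_ → Spec_decodeHamming h_ (decodeHamming h_)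

-- ===== LEMMAS AND PROOFS =====

-- Common block-structured specification both loops are reduced to.
def bspec (s : List Char) (p : Nat) (sR : List String) (dR : List Char) :
    List Char × List String :=
  match s with
  | [] => (dR, sR)
  | c :: rest => bspec (rest.drop (p-1)) (2*p) (sR ++ [String.ofList [c]]) (dR ++ rest.take (p-1))
termination_by s.length
decreasing_by simp

-- 2^k has no bit in common with 2^k - 1
theorem pow2_and_pred (k : Nat) : 2^k &&& (2^k - 1) = 0 := by
  apply Nat.eq_of_testBit_eq
  intro i
  rw [Nat.testBit_and, Nat.testBit_two_pow, Nat.testBit_two_pow_sub_one, Nat.zero_testBit]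
  by_cases h : k = i <;> simp [h]

theorem testBit_of_between (m k : Nat) (h1 : 2^k ≤ m) (h2 : m < 2^(k+1)) :
    m.testBit k = true := by
  have hlt : m - 2^k < 2^k := by
    have : 2^(k+1) = 2^k + 2^k := by rw [pow_succ]; omega
    omega
  have e : m = 2^k + (m - 2^k) := by omega
  rw [e, Nat.testBit_two_pow_add_eq, Nat.testBit_lt_two_pow hlt]
  rfl

-- strictly between consecutive powers of two: n & (n-1) ≠ 0
theorem and_pred_ne_zero_of_between (n k : Nat) (h1 : 2^k < n) (h2 : n < 2^(k+1)) :
    n &&& (n - 1) ≠ 0 := by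
  intro h0
  have hb1 : n.testBit k = true := testBit_of_between n k (by omega) h2
  have hb2 : (n-1).testBit k = true := testBit_of_between (n-1) k (by omega) (by omega)
  have : (n &&& (n-1)).testBit k = true := by simp [Nat.testBit_and, hb1, hb2]
  rw [h0] at this
  simp at this

-- A's loop runs straight through a block of non-power-of-two indices
theorem decodeHammingLoop_block (b : List Char) (u : List Char) (j : Nat)
    (sR : List String) (dR : List Char)
    (hb : ∀ m < b.length, (j + m + 1) &&& (j + m) ≠ 0) :
    decodeHammingLoop (b ++ u) j sR dR = decodeHammingLoop u (j + b.length) sR (dR ++ b) := by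
  induction b generalizing j dR with
  | nil => simp
  | cons x b' ih =>
    have h0 : (j + 1) &&& j ≠ 0 := by have := hb 0 (by simp); simpa using this
    have hb' : ∀ m < b'.length, (j + 1 + m + 1) &&& (j + 1 + m) ≠ 0 := by
      intro m hm
      have h := hb (m+1) (by simp; omega)
      have e1 : j + 1 + m + 1 = j + (m + 1) + 1 := by omega
      have e2 : j + 1 + m = j + (m + 1) := by omega
      rw [e1, e2]; exact h
    simp only [List.cons_append, decodeHammingLoop]
    rw [if_neg (by simp [h0])]
    rw [ih (j+1) (dR ++ [x]) hb']
    have ei : j + 1 + b'.length = j + (x :: b').length := by simp; omega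
    have ed : (dR ++ [x]) ++ b' = dR ++ (x :: b') := by simp
    rw [ei, ed]

theorem decodeHammingLoop_eq_bspec (n : Nat) : ∀ (s : List Char), s.length ≤ n →
    ∀ (k : Nat) (sR : List String) (dR : List Char),
    decodeHammingLoop s (2^k - 1) sR dR = bspec s (2^k) sR dR := by
  induction n with
  | zero =>
    intro s hs k sR dR
    have : s = [] := List.eq_nil_of_length_eq_zero (by omega)
    subst this; simp [decodeHammingLoop, bspec]
  | succ n ih =>
    intro s hs k sR dR
    match s with
    | [] => simp [decodeHammingLoop, bspec]
    | c :: rest =>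
      have hk1 : (1:Nat) ≤ 2^k := Nat.one_le_two_pow
      have e1 : 2^k - 1 + 1 = 2^k := by omega
      have hblock : ∀ m < (rest.take (2^k-1)).length, (2^k + m + 1) &&& (2^k + m) ≠ 0 := by
        intro m hm
        have hmlt : m < 2^k - 1 := by simp at hm; omega
        have h2 : 2^k + m + 1 < 2^(k+1) := by rw [pow_succ]; omega
        have := and_pred_ne_zero_of_between (2^k + m + 1) k (by omega) h2
        simpa using this
      have lhs1 : decodeHammingLoop (c::rest) (2^k-1) sR dR
          = decodeHammingLoop (rest.drop (2^k-1)) (2^k + (rest.take (2^k-1)).length)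
              (sR ++ [String.ofList [c]]) (dR ++ rest.take (2^k-1)) := by
        simp only [decodeHammingLoop, e1]
        rw [if_pos (by simp [pow2_and_pred k])]
        conv_lhs => rw [show rest = rest.take (2^k-1) ++ rest.drop (2^k-1) from
          (List.take_append_drop _ _).symm]
        exact decodeHammingLoop_block _ _ _ _ _ hblock
      rw [lhs1]
      conv_rhs => rw [bspec]
      rcases Decidable.em (rest.length ≤ 2^k-1) with hle | hlt'
      all_goals try have hlt : 2^k-1 < rest.length := by omega
      · rw [List.drop_eq_nil_of_le hle]
        simp [decodeHammingLoop, bspec]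
      · have hbfull : (rest.take (2^k-1)).length = 2^k - 1 := by simp; omega
        have e2 : 2^k + (rest.take (2^k-1)).length = 2^(k+1) - 1 := by
          rw [hbfull, pow_succ]; omega
        have e3 : 2*2^k = 2^(k+1) := by rw [pow_succ]; omega
        have hulen' : (rest.drop (2^k-1)).length ≤ n := by simp at hs ⊢; omega
        rw [e2, e3, ih _ hulen' (k+1)]

theorem decodeHammingAltLoop_eq_bspec (n : Nat) : ∀ (l : List Char) (p : Nat) (hp : 1 ≤ p),
    l.length - (p - 1) ≤ n → ∀ (sR : List String) (dR : List Char),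
    decodeHammingAltLoop l p hp sR dR = bspec (l.drop (p-1)) p sR dR := by
  induction n with
  | zero =>
    intro l p hp hn sR dR
    have hge : l.length ≤ p - 1 := by omega
    rw [decodeHammingAltLoop]
    rw [dif_neg (by omega)]
    rw [List.drop_eq_nil_of_le hge]
    simp [bspec]
  | succ n ih =>
    intro l p hp hn sR dR
    rw [decodeHammingAltLoop]
    rcases Decidable.em (p - 1 < l.length) with hlt | hge
    · rw [dif_pos hlt]
      rw [ih l (2*p) (by omega) (by omega)]
      have hdropcons : l.drop (p-1) = l[p-1] :: l.drop p := by
        have e : p - 1 + 1 = p := by omega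
        rw [← List.getElem_cons_drop hlt, e]
      conv_rhs => rw [hdropcons, bspec]
      have e1 : (l.drop p).drop (p-1) = l.drop (2*p - 1) := by
        rw [List.drop_drop]; congr 1; omega
      rw [e1]
    · rw [dif_neg hge]
      rw [List.drop_eq_nil_of_le (by omega)]
      simp [bspec]

-- ===== VERDICT (by name: the statement is the Claim_ definition above) =====
theorem decodeHamming_spec : Claim_equal_decodeHamming := by
  intro h_ _
  unfold Spec_decodeHamming decodeHamming decodeHamming_alt
  set l := (PySem.Str.replace h_ " " "").toList with hl
  have hA : decodeHammingLoop l 0 [] [] = bspec l 1 [] [] := by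
    have := decodeHammingLoop_eq_bspec l.length l (le_refl _) 0 [] []
    simpa using this
  have hB : decodeHammingAltLoop l 1 (by omega) [] [] = bspec l 1 [] [] := by
    have := decodeHammingAltLoop_eq_bspec l.length l 1 (by omega) (by omega) [] []
    simpa using this
  simp only [hA, hB]
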